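-- pv_equiv track=rewrite | github.com/SeaC0w/artificial-Intelligence-HW | HW3/kmeans.py | get_cluster_class
-- ===== SOURCE A (Python) =====
-- SAFE = "Safe"
--
-- COMP = "Compliant"
--
-- NON_COMP = "NonCompliant"
--
-- def get_cluster_class(oshaList):
--     amtSafe = 0
--     amtComp = 0
--     amtNonC = 0
--     for s in oshaList:
--         if s == SAFE:
--             amtSafe += 1
--         elif s == COMP:
--             amtComp += 1
--         else:
--             amtNonC += 1
--     if (amtSafe >= amtComp) and (amtSafe >= amtNonC):
--         return SAFE
--     elif (amtComp >= amtNonC):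
--         return COMP
--     else:
--         return NON_COMP
-- ===== SOURCE B (Python) =====
-- SAFE = "Safe"
--
-- COMP = "Compliant"
--
-- NON_COMP = "NonCompliant"
--
-- def get_cluster_class(oshaList):
--     # Sort-then-run-scan: map each label to a priority rank (unknown labels rank
--     # with NonCompliant, like A's else branch), sort the ranks so equal labels
--     # form contiguous runs in priority order, and take the first longest run.
--     ranks = sorted(0 if s == SAFE else 1 if s == COMP else 2 for s in oshaList)
--     best_key, best_len = 0, 0
--     i = 0
--     while i < len(ranks):
--         j = i
--         while j < len(ranks) and ranks[j] == ranks[i]: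
--             j += 1
--         if j - i > best_len:
--             best_key, best_len = ranks[i], j - i
--         i = j
--     return (SAFE, COMP, NON_COMP)[best_key]
-- ===== Notes on version B (the rewrite author's own statement) =====
-- stated objective: alternative
-- what changed: Replaces the three-counter loop with if/elif/else decision chain by a sort-then-scan algorithm: map labels to priority ranks (0=Safe,1=Compliant,2=other), sort the ranks so equal labels form contiguous runs in priority order, and scan the runs keeping the first longest one.
import Mathlib
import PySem

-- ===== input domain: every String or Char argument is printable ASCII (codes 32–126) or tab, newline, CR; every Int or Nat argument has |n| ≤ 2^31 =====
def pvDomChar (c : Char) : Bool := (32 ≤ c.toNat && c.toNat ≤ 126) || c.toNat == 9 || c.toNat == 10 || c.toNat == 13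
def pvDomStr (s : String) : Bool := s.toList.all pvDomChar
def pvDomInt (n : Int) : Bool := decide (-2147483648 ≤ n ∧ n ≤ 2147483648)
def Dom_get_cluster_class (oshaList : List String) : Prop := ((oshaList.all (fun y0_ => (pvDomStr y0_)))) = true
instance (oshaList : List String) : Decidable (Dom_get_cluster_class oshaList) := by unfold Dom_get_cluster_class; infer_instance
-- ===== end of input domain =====

-- B replaces A's three-counter loop + if/elif chain by sort-then-run-scan over priority
-- ranks (alternative algorithm; not faster).


-- ===== PORT A =====
def get_cluster_class (oshaList : List String) : String :=
  let acc := oshaList.foldl (fun (t : Nat × Nat × Nat) s =>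
    if s = "Safe" then (t.1 + 1, t.2.1, t.2.2)
    else if s = "Compliant" then (t.1, t.2.1 + 1, t.2.2)
    else (t.1, t.2.1, t.2.2 + 1)) (0, 0, 0)
  if acc.1 ≥ acc.2.1 ∧ acc.1 ≥ acc.2.2 then "Safe"
  else if acc.2.1 ≥ acc.2.2 then "Compliant"
  else "NonCompliant"

-- ===== PORT B =====
-- priority rank: 0 if s == SAFE else 1 if s == COMP else 2
def pvRank (s : String) : Int := if s = "Safe" then 0 else if s = "Compliant" then 1 else 2

-- The two nested while loops of Source B: the inner loop advances j over the run that
-- starts at i (its length is 1 + the count of following elements equal to the run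
-- head, i.e. takeWhile; advancing i to j is dropWhile); the outer loop keeps the
-- first strictly-longest run seen.
def pvRunScan : List Int → Int → Nat → Int
  | [], bestKey, _ => bestKey
  | x :: xs, bestKey, bestLen =>
    let n := (xs.takeWhile (fun y => y == x)).length + 1
    let rest := xs.dropWhile (fun y => y == x)
    if n > bestLen then pvRunScan rest x n else pvRunScan rest bestKey bestLen
termination_by l _ _ => l.length
decreasing_by
  all_goals
    simp only [List.length_cons]
    have := List.length_dropWhile_le (fun y => y == x) xs
    omega

def get_cluster_class_alt (oshaList : List String) : String :=
  let ranks := PySem.List.sorted (oshaList.map pvRank) (fun x => x) false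
  PySem.List.pyGetD ["Safe", "Compliant", "NonCompliant"] (pvRunScan ranks 0 0) ""

-- ===== PRECONDITION & SPEC =====
def Spec_get_cluster_class (oshaList : List String) (out : String) : Prop := out = get_cluster_class_alt oshaList
instance (oshaList : List String) (out : String) : Decidable (Spec_get_cluster_class oshaList out) := by unfold Spec_get_cluster_class; infer_instance

-- ===== CLAIM (what is proved, stated in full; the proofs are below) =====
def Claim_equal_get_cluster_class : Prop := ∀ (oshaList : List String), Dom_get_cluster_class oshaList → Spec_get_cluster_class oshaList (get_cluster_class oshaList)

-- ===== LEMMAS AND PROOFS =====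

-- the sorted rank list, in closed form
def pvCanon (a b c : Nat) : List Int :=
  List.replicate a 0 ++ List.replicate b 1 ++ List.replicate c 2

theorem countsum_le (l : List String) :
    l.count "Safe" + l.count "Compliant" ≤ l.length := by
  induction l with
  | nil => simp
  | cons x xs ih =>
    by_cases hx : x = "Safe" <;> by_cases hy : x = "Compliant" <;>
      simp [hx, hy] <;> omega

theorem foldA (l : List String) (a b c : Nat) :
    l.foldl (fun (t : Nat × Nat × Nat) s =>
      if s = "Safe" then (t.1 + 1, t.2.1, t.2.2)
      else if s = "Compliant" then (t.1, t.2.1 + 1, t.2.2)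
      else (t.1, t.2.1, t.2.2 + 1)) (a, b, c)
    = (a + l.count "Safe", b + l.count "Compliant",
       c + (l.length - l.count "Safe" - l.count "Compliant")) := by
  induction l generalizing a b c with
  | nil => simp
  | cons x xs ih =>
    have hle := countsum_le xs
    by_cases hx : x = "Safe" <;> by_cases hy : x = "Compliant" <;>
      simp [List.foldl_cons, hx, hy, ih, Prod.ext_iff] <;> omega

theorem perm_canon (l : List String) :
    (pvCanon (l.count "Safe") (l.count "Compliant")
      (l.length - l.count "Safe" - l.count "Compliant")).Perm (l.map pvRank) := by
  induction l with
  | nil => simp [pvCanon]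
  | cons x xs ih =>
    have hle := countsum_le xs
    by_cases hx : x = "Safe"
    · simpa [pvCanon, hx, List.count_cons, List.replicate_succ, pvRank] using ih.cons 0
    · by_cases hy : x = "Compliant"
      · have hA : (x :: xs).count "Safe" = xs.count "Safe" := by
          simp [hx]
        have hB : (x :: xs).count "Compliant" = xs.count "Compliant" + 1 := by
          simp [hy]
        have hC : (x :: xs).length - (x :: xs).count "Safe" - (x :: xs).count "Compliant"
            = xs.length - xs.count "Safe" - xs.count "Compliant" := by
          rw [hA, hB, List.length_cons]; omega
        have hr : pvRank x = 1 := by simp [pvRank, hy]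
        rw [hC, hB, hA, List.map_cons, hr]
        have h1 : pvCanon (xs.count "Safe") (xs.count "Compliant" + 1)
            (xs.length - xs.count "Safe" - xs.count "Compliant")
            = List.replicate (xs.count "Safe") 0 ++ (1 :: (List.replicate (xs.count "Compliant") 1 ++
              List.replicate (xs.length - xs.count "Safe" - xs.count "Compliant") 2)) := by
          simp [pvCanon, List.replicate_succ]
        rw [h1]
        refine List.perm_middle.trans ?_
        simpa [pvCanon, List.append_assoc] using ih.cons 1
      · have hA : (x :: xs).count "Safe" = xs.count "Safe" := by
          simp [hx]
        have hB : (x :: xs).count "Compliant" = xs.count "Compliant" := by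
          simp [hy]
        have hC : (x :: xs).length - (x :: xs).count "Safe" - (x :: xs).count "Compliant"
            = (xs.length - xs.count "Safe" - xs.count "Compliant") + 1 := by
          rw [hA, hB, List.length_cons]; omega
        have hr : pvRank x = 2 := by simp [pvRank, hx, hy]
        rw [hC, hB, hA, List.map_cons, hr]
        have h1 : pvCanon (xs.count "Safe") (xs.count "Compliant")
            ((xs.length - xs.count "Safe" - xs.count "Compliant") + 1)
            = (List.replicate (xs.count "Safe") 0 ++ List.replicate (xs.count "Compliant") 1) ++
              (2 :: List.replicate (xs.length - xs.count "Safe" - xs.count "Compliant") 2) := by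
          simp [pvCanon, List.replicate_succ, List.append_assoc]
        rw [h1]
        refine List.perm_middle.trans ?_
        simpa [pvCanon, List.append_assoc] using ih.cons 2

theorem pairwise_canon (a b c : Nat) : (pvCanon a b c).Pairwise (· ≤ ·) := by
  have hr : ∀ (n : Nat) (x : Int), (List.replicate n x).Pairwise (· ≤ ·) :=
    fun n x => List.pairwise_replicate.2 (Or.inr le_rfl)
  simp only [pvCanon, List.pairwise_append, List.mem_append, List.mem_replicate]
  refine ⟨⟨hr _ _, hr _ _, ?_⟩, hr _ _, ?_⟩ <;> rintro y hy z hz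
  · obtain ⟨-, rfl⟩ := hy; obtain ⟨-, rfl⟩ := hz; norm_num
  · obtain ⟨-, rfl⟩ := hz
    rcases hy with ⟨-, rfl⟩ | ⟨-, rfl⟩ <;> norm_num

theorem sorted_eq_canon (l : List String) :
    PySem.List.sorted (l.map pvRank) (fun x => x) false
      = pvCanon (l.count "Safe") (l.count "Compliant")
        (l.length - l.count "Safe" - l.count "Compliant") :=
  PySem.List.sorted_id_eq_of_perm_of_pairwise _ _ (perm_canon l) (pairwise_canon _ _ _)

theorem takeWhile_rep {k : Int} (n : Nat) (rest : List Int)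
    (h : rest.takeWhile (fun y => y == k) = []) :
    (List.replicate n k ++ rest).takeWhile (fun y => y == k) = List.replicate n k ∧
    (List.replicate n k ++ rest).dropWhile (fun y => y == k) = rest := by
  induction n with
  | zero =>
    refine ⟨by simpa using h, ?_⟩
    cases rest with
    | nil => rfl
    | cons y ys =>
      simp only [List.takeWhile] at h
      cases hyk : (y == k)
      · simp [hyk]
      · simp [hyk] at h
  | succ m ih => simp [List.replicate_succ, ih]

theorem runScan_block {k : Int} (n : Nat) (hn : 0 < n) (rest : List Int)
    (h : rest.takeWhile (fun y => y == k) = []) (bk : Int) (bl : Nat) :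
    pvRunScan (List.replicate n k ++ rest) bk bl
      = pvRunScan rest (if n > bl then k else bk) (if n > bl then n else bl) := by
  obtain ⟨m, rfl⟩ : ∃ m, n = m + 1 := ⟨n - 1, by omega⟩
  have hw := takeWhile_rep (k := k) m rest h
  rw [List.replicate_succ, List.cons_append, pvRunScan]
  rw [hw.1, hw.2, List.length_replicate]
  split_ifs <;> rfl

theorem scan_canon (a b c : Nat) :
    pvRunScan (pvCanon a b c) 0 0
      = (if a ≥ b ∧ a ≥ c then 0 else if b ≥ c then 1 else 2) := by
  have h2 : ∀ (bk : Int) (bl : Nat), pvRunScan (List.replicate c 2) bk bl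
      = (if c > bl then 2 else bk) := by
    intro bk bl
    rcases Nat.eq_zero_or_pos c with hc | hc
    · subst hc; simp [pvRunScan]
    · rw [show List.replicate c (2:Int) = List.replicate c 2 ++ [] by simp,
        runScan_block c hc [] (by simp) bk bl]
      split_ifs <;> simp [pvRunScan]
  have h1 : ∀ (bk : Int) (bl : Nat),
      pvRunScan (List.replicate b 1 ++ List.replicate c 2) bk bl
      = (if c > (if b > bl then b else bl) then 2 else (if b > bl then 1 else bk)) := by
    intro bk bl
    rcases Nat.eq_zero_or_pos b with hb | hb
    · subst hb; simp [h2]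
    · have ht : (List.replicate c (2:Int)).takeWhile (fun y => y == 1) = [] := by
        cases c with
        | zero => rfl
        | succ m => simp [List.replicate_succ]
      rw [runScan_block b hb _ ht bk bl, h2]
  have h0 : pvRunScan (pvCanon a b c) 0 0
      = (if c > (if b > (if a > 0 then a else 0) then b else (if a > 0 then a else 0))
          then 2 else (if b > (if a > 0 then a else 0) then 1 else (0:Int))) := by
    rcases Nat.eq_zero_or_pos a with ha | ha
    · subst ha; simp [pvCanon, h1]
    · have ht : (List.replicate b (1:Int) ++ List.replicate c 2).takeWhile (fun y => y == 0) = [] := by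
        cases b with
        | zero => cases c with
          | zero => rfl
          | succ m => simp [List.replicate_succ]
        | succ m => simp [List.replicate_succ]
      rw [pvCanon, List.append_assoc, runScan_block a ha _ ht 0 0, h1]
      split_ifs <;> rfl
  rw [h0]
  rcases Nat.eq_zero_or_pos a with ha | ha <;> split_ifs <;> first | rfl | omega

theorem get_cluster_class_eq (l : List String) :
    get_cluster_class l = get_cluster_class_alt l := by
  show (if _ ∧ _ then _ else _) = PySem.List.pyGetD _ _ _
  rw [foldA, sorted_eq_canon, scan_canon]
  simp only [Nat.zero_add]
  split_ifs <;> rfl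

-- ===== VERDICT (by name: the statement is the Claim_ definition above) =====
theorem get_cluster_class_spec : Claim_equal_get_cluster_class := by
  intro l _
  unfold Spec_get_cluster_class
  exact get_cluster_class_eq l
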